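-- pv_equiv track=rewrite | github.com/ganbon/NovelCharacterAI | scripts/create_train_dataset.py | extract_chracter_name
-- ===== SOURCE A (Python) =====
-- def extract_chracter_name(dialogue, charachter_list):
--     name_in_dialogue_list = []
--     for utterance in dialogue:
--         utterance = utterance["utterance"]
--         for character in charachter_list:
--             name_list = sorted(character["name"], key=lambda x: len(x), reverse=True)
--             for name in name_list:
--                 if name in utterance:
--                     name_in_dialogue_list.append(name)
--                     break
--     return list(set(name_in_dialogue_list))
-- ===== SOURCE B (Python) =====
-- def extract_chracter_name(dialogue, charachter_list):
--     def best(text, names):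
--         present = [n for n in names if n in text]
--         return max(present, key=len) if present else None
--     found = [m
--              for utt in dialogue
--              for m in (best(utt["utterance"], ch["name"]) for ch in charachter_list)
--              if m is not None]
--     return list(set(found))
-- ===== Notes on version B (the rewrite author's own statement) =====
-- stated objective: simpler
-- what changed: A runs nested loops that sort each character's names by length descending and break at the first substring match, appending to an accumulator; B has no sort and no accumulator: a flat comprehension maps every (utterance, character) pair through a best() helper that filters the names present in the text and takes the single max-by-length (first maximal on ties), collecting the non-None results.
import Mathlib
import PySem

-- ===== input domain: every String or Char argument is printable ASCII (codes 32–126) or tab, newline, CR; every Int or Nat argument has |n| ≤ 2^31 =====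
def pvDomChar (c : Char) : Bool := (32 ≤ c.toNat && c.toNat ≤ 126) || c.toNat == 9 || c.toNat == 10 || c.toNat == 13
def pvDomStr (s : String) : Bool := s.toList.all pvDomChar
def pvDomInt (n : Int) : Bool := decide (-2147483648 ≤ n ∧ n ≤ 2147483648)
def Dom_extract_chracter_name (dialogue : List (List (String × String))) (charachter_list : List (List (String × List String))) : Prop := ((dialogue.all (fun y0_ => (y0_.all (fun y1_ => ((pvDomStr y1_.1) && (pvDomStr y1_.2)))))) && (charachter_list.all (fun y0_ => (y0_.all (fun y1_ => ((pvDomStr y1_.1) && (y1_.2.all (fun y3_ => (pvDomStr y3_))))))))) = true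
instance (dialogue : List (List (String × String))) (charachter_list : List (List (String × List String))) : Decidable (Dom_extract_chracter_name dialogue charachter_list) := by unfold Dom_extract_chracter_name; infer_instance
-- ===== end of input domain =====

-- B replaces A's nested accumulator loops with sort-and-break by a flat comprehension:
-- each (utterance, character) pair is mapped through a filter-then-max-by-length helper
-- and the non-None results are collected (no sort, no mutable accumulator).


-- ===== PORT A =====
-- name_in_dialogue_list = []
-- for utterance in dialogue: utterance = utterance["utterance"]
--   for character in charachter_list:
--     name_list = sorted(character["name"], key=len, reverse=True)
--     for name in name_list: if name in utterance: append(name); break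
-- return list(set(name_in_dialogue_list))
-- the body of A's 'for character in charachter_list' loop
def pvAStep (utterance : String) (acc : List String) (character : List (String × List String)) : List String :=
  let name_list := PySem.List.sorted (PySem.Dict.getD ⟨character⟩ "name" []) (fun x => PySem.Str.len x) true
  match name_list.find? (fun name => PySem.Str.isIn name utterance) with
  | some name => acc ++ [name]
  | none => acc

def extract_chracter_name (dialogue : List (List (String × String))) (charachter_list : List (List (String × List String))) : List String :=
  let name_in_dialogue_list :=
    dialogue.foldl (fun acc utt =>
      let utterance := PySem.Dict.getD ⟨utt⟩ "utterance" ""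
      charachter_list.foldl (pvAStep utterance) acc) []
  PySem.Set.ofList name_in_dialogue_list

-- ===== PORT B =====
-- def best(text, names): present = [n for n in names if n in text]
--                        return max(present, key=len) if present else None
def pvBest (text : String) (names : List String) : Option String :=
  PySem.List.max? (names.filter (fun n => PySem.Str.isIn n text)) (fun n => PySem.Str.len n)

-- found = [m for utt in dialogue
--            for m in (best(utt["utterance"], ch["name"]) for ch in charachter_list)
--            if m is not None]
-- return list(set(found))
def extract_chracter_name_alt (dialogue : List (List (String × String))) (charachter_list : List (List (String × List String))) : List String :=
  PySem.Set.ofList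
    (dialogue.flatMap (fun utt =>
      charachter_list.filterMap (fun ch =>
        pvBest (PySem.Dict.getD ⟨utt⟩ "utterance" "") (PySem.Dict.getD ⟨ch⟩ "name" []))))

-- ===== PRECONDITION & SPEC =====
-- Pre_ excludes exactly the inputs on which Python A raises KeyError: a dialogue entry
-- without the key "utterance", or (with a nonempty dialogue) a character entry without the key "name".
def Pre_extract_chracter_name (dialogue : List (List (String × String))) (charachter_list : List (List (String × List String))) : Prop :=
  (∀ u ∈ dialogue, PySem.Dict.contains ⟨u⟩ "utterance" = true) ∧
  (dialogue = [] ∨ ∀ c ∈ charachter_list, PySem.Dict.contains ⟨c⟩ "name" = true)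
instance (dialogue : List (List (String × String))) (charachter_list : List (List (String × List String))) : Decidable (Pre_extract_chracter_name dialogue charachter_list) := by unfold Pre_extract_chracter_name; infer_instance
def pvWitness_extract_chracter_name : (List (List (String × String))) × (List (List (String × List String))) :=
  ([[("utterance", "ab cd")]], [[("name", ["ab", "x"])], [("name", ["cd"])]])
def Spec_extract_chracter_name (dialogue : List (List (String × String))) (charachter_list : List (List (String × List String))) (out : List String) : Prop := out = extract_chracter_name_alt dialogue charachter_list
instance (dialogue : List (List (String × String))) (charachter_list : List (List (String × List String))) (out : List String) : Decidable (Spec_extract_chracter_name dialogue charachter_list out) := by unfold Spec_extract_chracter_name; infer_instance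

-- ===== CLAIM (what is proved, stated in full; the proofs are below) =====
def Claim_equal_extract_chracter_name : Prop := ∀ (dialogue : List (List (String × String))) (charachter_list : List (List (String × List String))), Dom_extract_chracter_name dialogue charachter_list → Pre_extract_chracter_name dialogue charachter_list → Spec_extract_chracter_name dialogue charachter_list (extract_chracter_name dialogue charachter_list)

-- ===== LEMMAS AND PROOFS =====

-- find? = head? of filter
theorem pv_find?_eq_head?_filter {α : Type} (p : α → Bool) (l : List α) :
    l.find? p = (l.filter p).head? := by
  induction l with
  | nil => rfl
  | cons x xs ih =>
    by_cases h : p x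
    · rw [List.find?_cons_of_pos h, List.filter_cons_of_pos h, List.head?_cons]
    · rw [List.find?_cons_of_neg h, List.filter_cons_of_neg h, ih]

-- filtering commutes with inserting into a descending-sorted list
theorem pv_filter_insertBy {α κ : Type} [LinearOrder κ] (key : α → κ) (p : α → Bool) (x : α)
    (l : List α) (hl : l.Pairwise (fun a b => key b ≤ key a)) :
    (PySem.List.insertBy (fun a b => decide (key b < key a)) x l).filter p =
      if p x then PySem.List.insertBy (fun a b => decide (key b < key a)) x (l.filter p)
      else l.filter p := by
  induction l with
  | nil => simp [PySem.List.insertBy]; split <;> simp_all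
  | cons y ys ih =>
    have hy : ∀ z ∈ ys, key z ≤ key y := by
      intro z hz; exact (List.pairwise_cons.mp hl).1 z hz
    have hys := (List.pairwise_cons.mp hl).2
    by_cases hlt : key y < key x
    · simp only [PySem.List.insertBy, hlt, decide_true, if_true]
      by_cases hpx : p x
      · by_cases hpy : p y
        · simp [List.filter, hpx, hpy, PySem.List.insertBy, hlt]
        · have hall : ∀ z ∈ ys.filter p, key z < key x := by
            intro z hz
            exact lt_of_le_of_lt (hy z (List.mem_of_mem_filter hz)) hlt
          simp only [List.filter, hpx, hpy]
          cases hys' : ys.filter p with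
          | nil => simp [PySem.List.insertBy]
          | cons z zs =>
            have : key z < key x := hall z (by rw [hys']; exact List.mem_cons_self)
            simp [PySem.List.insertBy, this]
      · simp [List.filter, hpx]
    · simp only [PySem.List.insertBy, hlt, decide_false]
      by_cases hpy : p y
      · by_cases hpx : p x <;>
          simp [List.filter, hpy, hpx, ih hys, PySem.List.insertBy, hlt]
      · by_cases hpx : p x <;> simp [List.filter, hpy, hpx, ih hys]

-- stability: filter commutes with the (stable, descending) sort
theorem pv_filter_sorted {α κ : Type} [LinearOrder κ] (key : α → κ) (p : α → Bool)
    (xs : List α) :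
    (PySem.List.sorted xs key true).filter p = PySem.List.sorted (xs.filter p) key true := by
  induction xs using List.reverseRecOn with
  | nil => rfl
  | append_singleton xs x ih =>
    rw [PySem.List.sorted_rev_eq_foldl_insertBy, List.foldl_append,
        ← PySem.List.sorted_rev_eq_foldl_insertBy]
    simp only [List.foldl]
    rw [pv_filter_insertBy key p x _ (PySem.List.sorted_pairwise_rev xs key)]
    by_cases hpx : p x
    · rw [if_pos hpx, ih, List.filter_append,
          PySem.List.sorted_rev_eq_foldl_insertBy (xs.filter p ++ [x].filter p),
          List.foldl_append, ← PySem.List.sorted_rev_eq_foldl_insertBy]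
      simp [List.filter, hpx]
    · rw [if_neg hpx, ih, List.filter_append]
      simp [List.filter, hpx]

-- the head of the descending sort is the first maximal element
theorem pv_head?_sorted_rev {α κ : Type} [LinearOrder κ] (key : α → κ) (ys : List α) :
    (PySem.List.sorted ys key true).head? = PySem.List.max? ys key := by
  induction ys using List.reverseRecOn with
  | nil => rfl
  | append_singleton ys y ih =>
    rw [PySem.List.sorted_rev_eq_foldl_insertBy, List.foldl_append,
        ← PySem.List.sorted_rev_eq_foldl_insertBy]
    simp only [List.foldl]
    unfold PySem.List.max?
    rw [List.foldl_append]
    rw [PySem.List.max?] at ih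
    rw [← ih]
    cases h : (PySem.List.sorted ys key true) with
    | nil => simp [PySem.List.insertBy]
    | cons z zs =>
      simp only [List.head?, List.foldl]
      by_cases hzy : key z < key y
      · simp [PySem.List.insertBy, hzy]
      · simp [PySem.List.insertBy, hzy]

-- A's sort + break over one character = B's best (filter + first max-by-length)
theorem pv_core {α κ : Type} [LinearOrder κ] (key : α → κ) (p : α → Bool) (ns : List α) :
    (PySem.List.sorted ns key true).find? p = PySem.List.max? (ns.filter p) key := by
  rw [pv_find?_eq_head?_filter, pv_filter_sorted, pv_head?_sorted_rev]

-- A's inner loop over the characters = filterMap of B's best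
theorem pv_inner_eq_filterMap (utterance : String)
    (cs : List (List (String × List String))) (acc : List String) :
    cs.foldl (pvAStep utterance) acc
      = acc ++ cs.filterMap (fun ch => pvBest utterance (PySem.Dict.getD ⟨ch⟩ "name" [])) := by
  induction cs generalizing acc with
  | nil => simp
  | cons c cs ih =>
    simp only [List.foldl, List.filterMap_cons]
    have hstep : pvAStep utterance acc c
        = match pvBest utterance (PySem.Dict.getD ⟨c⟩ "name" []) with
          | some name => acc ++ [name]
          | none => acc := by
      unfold pvAStep pvBest
      simp only [pv_core]
    rw [hstep]
    cases h : pvBest utterance (PySem.Dict.getD ⟨c⟩ "name" []) <;> simp [ih]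

-- ===== VERDICT (by name: the statement is the Claim_ definition above) =====
theorem extract_chracter_name_spec : Claim_equal_extract_chracter_name := by
  intro dialogue charachter_list _ _
  unfold Spec_extract_chracter_name extract_chracter_name extract_chracter_name_alt
  simp only [pv_inner_eq_filterMap, PySem.List.foldl_append_eq_flatMap, List.nil_append]
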